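-- pv_equiv track=rewrite | github.com/maneav78/pipescope | pipescope/core/ai_advisor.py | build_ai_summary
-- ===== SOURCE A (Python) =====
-- from typing import Dict, List, Optional
--
-- def build_ai_summary(findings: List[Dict]) -> str:
--     """
--     Return a short plain-text executive summary paragraph derived from the
--     enriched findings list (no API call – always fast).
--     """
--     from collections import Counter
--
--     if not findings:
--         return "No security issues were detected in this scan. Maintain regular scanning to stay ahead of emerging threats."
--
--     counts: Counter = Counter(f.get("severity", "Info") for f in findings)
--     critical = counts.get("Critical", 0)
--     high = counts.get("High", 0)
--     medium = counts.get("Medium", 0)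
--     info = counts.get("Info", 0) + counts.get("Low", 0)
--
--     parts: List[str] = []
--     if critical:
--         parts.append(f"{critical} Critical finding(s) require immediate remediation")
--     if high:
--         parts.append(f"{high} High-severity issue(s) should be addressed within 24-48 hours")
--     if medium:
--         parts.append(f"{medium} Medium-severity issue(s) should be scheduled for the next sprint")
--     if info:
--         parts.append(f"{info} informational note(s) are provided for awareness")
--
--     headline = "; ".join(parts) + "." if parts else "All findings are informational."
--
--     top_ids = list({f.get("id", "").split("-")[0] + f.get("id", "") for f in findings[:5]})
--     focus_areas = ", ".join(
--         f.get("title", "")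
--         for f in sorted(findings, key=lambda x: ["Critical", "High", "Medium", "Info"].index(
--             x.get("severity", "Info") if x.get("severity", "Info") in ["Critical", "High", "Medium", "Info"] else "Info"
--         ))[:3]
--     )
--     return (
--         f"{headline} "
--         f"Priority focus areas: {focus_areas}. "
--         "Review the detailed findings and AI-generated recommendations below for "
--         "targeted remediation guidance."
--     )
-- ===== SOURCE B (Python) =====
-- from typing import Dict, List
--
--
-- def _rank(sev: str) -> int:
--     return {"Critical": 0, "High": 1, "Medium": 2}.get(sev, 3)
--
--
-- def build_ai_summary(findings: List[Dict]) -> str: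
--     """Single-pass counting and bucketed priority selection (no Counter, no sort)."""
--     if not findings:
--         return "No security issues were detected in this scan. Maintain regular scanning to stay ahead of emerging threats."
--
--     critical = high = medium = info = 0
--     for f in findings:
--         sev = f.get("severity", "Info")
--         if sev == "Critical":
--             critical += 1
--         elif sev == "High":
--             high += 1
--         elif sev == "Medium":
--             medium += 1
--         elif sev == "Info" or sev == "Low":
--             info += 1
--
--     parts: List[str] = []
--     if critical:
--         parts.append(f"{critical} Critical finding(s) require immediate remediation")
--     if high:
--         parts.append(f"{high} High-severity issue(s) should be addressed within 24-48 hours")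
--     if medium:
--         parts.append(f"{medium} Medium-severity issue(s) should be scheduled for the next sprint")
--     if info:
--         parts.append(f"{info} informational note(s) are provided for awareness")
--
--     headline = "; ".join(parts) + "." if parts else "All findings are informational."
--
--     titles: List[str] = []
--     for rank in range(4):
--         if len(titles) == 3:
--             break
--         for f in findings:
--             if _rank(f.get("severity", "Info")) == rank:
--                 titles.append(f.get("title", ""))
--                 if len(titles) == 3:
--                     break
--     focus_areas = ", ".join(titles)
--
--     return (
--         f"{headline} "
--         f"Priority focus areas: {focus_areas}. "
--         "Review the detailed findings and AI-generated recommendations below for "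
--         "targeted remediation guidance."
--     )
-- ===== Notes on version B (the rewrite author's own statement) =====
-- stated objective: alternative
-- what changed: Replaces the Counter pass with a single four-accumulator counting loop, drops the dead top_ids set comprehension, and replaces sorted(findings, key=severity-index)[:3] with a bucketed selection that scans findings once per severity rank (0..3) collecting up to 3 titles in original order.
import Mathlib
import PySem

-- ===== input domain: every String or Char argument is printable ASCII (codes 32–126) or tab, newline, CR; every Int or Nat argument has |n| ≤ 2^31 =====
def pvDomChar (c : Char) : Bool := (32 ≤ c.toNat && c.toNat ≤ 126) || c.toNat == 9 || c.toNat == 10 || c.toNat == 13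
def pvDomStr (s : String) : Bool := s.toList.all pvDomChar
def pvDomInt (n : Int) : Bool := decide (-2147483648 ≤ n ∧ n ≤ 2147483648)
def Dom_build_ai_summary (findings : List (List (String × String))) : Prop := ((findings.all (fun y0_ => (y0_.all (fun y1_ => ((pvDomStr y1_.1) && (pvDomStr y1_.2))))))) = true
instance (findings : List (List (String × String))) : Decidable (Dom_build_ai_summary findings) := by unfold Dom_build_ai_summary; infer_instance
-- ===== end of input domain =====

-- B replaces the Counter pass by one four-accumulator loop, drops the dead top_ids line (harmless here:
-- all dict values are strings) and replaces the stable sort + [:3] by a bucketed per-rank scan; same output.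

-- ===== PORT A =====
-- the sort key lambda of A: ["Critical","High","Medium","Info"].index(sev if sev in [...] else "Info")
def pvKeyA (x : List (String × String)) : Int :=
  let sev := (PySem.Dict.mk x).getD "severity" "Info"
  let s2 := if ["Critical", "High", "Medium", "Info"].contains sev then sev else "Info"
  (((PySem.List.index? ["Critical", "High", "Medium", "Info"] s2).getD 0 : Nat) : Int)

def build_ai_summary (findings : List (List (String × String))) : String :=
  if findings = [] then
    "No security issues were detected in this scan. Maintain regular scanning to stay ahead of emerging threats."
  else
    let counts := PySem.Dict.counter (findings.map (fun f => (PySem.Dict.mk f).getD "severity" "Info"))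
    let critical := counts.getD "Critical" 0
    let high := counts.getD "High" 0
    let medium := counts.getD "Medium" 0
    let info := counts.getD "Info" 0 + counts.getD "Low" 0
    let parts : List String := []
    let parts := if critical ≠ 0 then parts ++ [PySem.Int.toStr critical ++ " Critical finding(s) require immediate remediation"] else parts
    let parts := if high ≠ 0 then parts ++ [PySem.Int.toStr high ++ " High-severity issue(s) should be addressed within 24-48 hours"] else parts
    let parts := if medium ≠ 0 then parts ++ [PySem.Int.toStr medium ++ " Medium-severity issue(s) should be scheduled for the next sprint"] else parts
    let parts := if info ≠ 0 then parts ++ [PySem.Int.toStr info ++ " informational note(s) are provided for awareness"] else parts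
    let headline := if parts ≠ [] then PySem.Str.join "; " parts ++ "." else "All findings are informational."
    -- dead code of A, kept: top_ids set (unused)
    let _top_ids := PySem.Set.ofList ((PySem.List.slice findings none (some 5)).map (fun f =>
      PySem.List.pyGetD ((PySem.Str.split? ((PySem.Dict.mk f).getD "id" "") "-").getD []) 0 "" ++ (PySem.Dict.mk f).getD "id" ""))
    let sortedF := PySem.List.sorted findings (fun x => pvKeyA x) false
    let focus_areas := PySem.Str.join ", " ((PySem.List.slice sortedF none (some 3)).map (fun f => (PySem.Dict.mk f).getD "title" ""))
    headline ++ " " ++ "Priority focus areas: " ++ focus_areas ++ ". " ++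
      "Review the detailed findings and AI-generated recommendations below for targeted remediation guidance."

-- ===== PORT B =====
def pvRankB (sev : String) : Int :=
  (PySem.Dict.mk [("Critical", (0 : Int)), ("High", 1), ("Medium", 2)]).getD sev 3

-- the inner 'for f in findings: … append … break at 3' loop of B
def pvCollect (rank : Int) (fs : List (List (String × String))) (acc : List String) : List String :=
  match fs with
  | [] => acc
  | f :: rest =>
    if pvRankB ((PySem.Dict.mk f).getD "severity" "Info") = rank then
      let acc2 := acc ++ [(PySem.Dict.mk f).getD "title" ""]
      if acc2.length = 3 then acc2 else pvCollect rank rest acc2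
    else pvCollect rank rest acc

def build_ai_summary_alt (findings : List (List (String × String))) : String :=
  if findings = [] then
    "No security issues were detected in this scan. Maintain regular scanning to stay ahead of emerging threats."
  else
    let cnts := findings.foldl (fun (s : Int × Int × Int × Int) f =>
      let sev := (PySem.Dict.mk f).getD "severity" "Info"
      if sev = "Critical" then (s.1 + 1, s.2.1, s.2.2.1, s.2.2.2)
      else if sev = "High" then (s.1, s.2.1 + 1, s.2.2.1, s.2.2.2)
      else if sev = "Medium" then (s.1, s.2.1, s.2.2.1 + 1, s.2.2.2)
      else if sev = "Info" ∨ sev = "Low" then (s.1, s.2.1, s.2.2.1, s.2.2.2 + 1)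
      else s) (0, 0, 0, 0)
    let critical := cnts.1
    let high := cnts.2.1
    let medium := cnts.2.2.1
    let info := cnts.2.2.2
    let parts : List String := []
    let parts := if critical ≠ 0 then parts ++ [PySem.Int.toStr critical ++ " Critical finding(s) require immediate remediation"] else parts
    let parts := if high ≠ 0 then parts ++ [PySem.Int.toStr high ++ " High-severity issue(s) should be addressed within 24-48 hours"] else parts
    let parts := if medium ≠ 0 then parts ++ [PySem.Int.toStr medium ++ " Medium-severity issue(s) should be scheduled for the next sprint"] else parts
    let parts := if info ≠ 0 then parts ++ [PySem.Int.toStr info ++ " informational note(s) are provided for awareness"] else parts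
    let headline := if parts ≠ [] then PySem.Str.join "; " parts ++ "." else "All findings are informational."
    let titles := (PySem.List.pyRange 0 4 1).foldl
      (fun acc r => if acc.length = 3 then acc else pvCollect r findings acc) []
    let focus_areas := PySem.Str.join ", " titles
    headline ++ " " ++ "Priority focus areas: " ++ focus_areas ++ ". " ++
      "Review the detailed findings and AI-generated recommendations below for targeted remediation guidance."

-- ===== PRECONDITION & SPEC =====
def Spec_build_ai_summary (findings : List (List (String × String))) (out : String) : Prop := out = build_ai_summary_alt findings
instance (findings : List (List (String × String))) (out : String) : Decidable (Spec_build_ai_summary findings out) := by unfold Spec_build_ai_summary; infer_instance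

-- ===== CLAIM (what is proved, stated in full; the proofs are below) =====
def Claim_equal_build_ai_summary : Prop := ∀ (findings : List (List (String × String))), Dom_build_ai_summary findings → Spec_build_ai_summary findings (build_ai_summary findings)

-- ===== LEMMAS AND PROOFS =====

-- the severity / title read from one finding
def pvSev (f : List (String × String)) : String := (PySem.Dict.mk f).getD "severity" "Info"
def pvTitle (f : List (String × String)) : String := (PySem.Dict.mk f).getD "title" ""

lemma insert_pos {α : Type} (key : α → Int) (x : α) (ys1 ys2 : List α)
    (h1 : ∀ y ∈ ys1, key y ≤ key x) (h2 : ∀ y ∈ ys2, key x < key y) :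
    PySem.List.insertBy (fun a b => decide (key a < key b)) x (ys1 ++ ys2) = ys1 ++ x :: ys2 := by
  induction ys1 with
  | nil =>
    cases ys2 with
    | nil => simp [PySem.List.insertBy]
    | cons y ys =>
      simp only [List.nil_append, PySem.List.insertBy]
      rw [if_pos (by simpa using h2 y (by simp))]
  | cons y ys1 ih =>
    simp only [List.cons_append, PySem.List.insertBy]
    rw [if_neg (by simp [not_lt]; exact h1 y (by simp))]
    simp only [List.cons.injEq, true_and]
    exact ih (fun z hz => h1 z (by simp [hz]))

def bks {α : Type} (k : α → Int) (fs : List α) : List α :=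
  fs.filter (fun f => k f == 0) ++ fs.filter (fun f => k f == 1) ++
  fs.filter (fun f => k f == 2) ++ fs.filter (fun f => k f == 3)

lemma mem_filter_key {α : Type} (k : α → Int) (i : Int) (fs : List α) (y : α)
    (hy : y ∈ fs.filter (fun f => k f == i)) : k y = i := by
  simpa using (List.mem_filter.mp hy).2

lemma sorted_eq_bks {α : Type} (k : α → Int) (hk : ∀ a, k a = 0 ∨ k a = 1 ∨ k a = 2 ∨ k a = 3)
    (fs : List α) : PySem.List.sorted fs k false = bks k fs := by
  induction fs using List.reverseRecOn with
  | nil => simp [bks, PySem.List.sorted_eq_foldl_insertBy]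
  | append_singleton fs x ih =>
    rw [PySem.List.sorted_eq_foldl_insertBy, List.foldl_append, ← PySem.List.sorted_eq_foldl_insertBy, ih]
    simp only [List.foldl_cons, List.foldl_nil]
    have hfmem : ∀ (i : Int), ∀ y ∈ fs.filter (fun f => k f == i), k y = i := fun i => mem_filter_key k i fs
    have hbapp : ∀ (i : Int), (fs ++ [x]).filter (fun f => k f == i)
        = fs.filter (fun f => k f == i) ++ if k x = i then [x] else [] := by
      intro i; rw [List.filter_append]; congr 1
      by_cases h : k x = i <;> simp [h]
    have hlow : ∀ (i : Int), ∀ y ∈ fs.filter (fun f => k f == i), k x = i → k y ≤ k x :=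
      fun i y hy hx => by rw [hfmem i y hy, hx]
    have hfx : ∀ (i j : Int), i < j → ∀ y ∈ fs.filter (fun f => k f == j), k x = i → k x < k y :=
      fun i j hij y hy hx => by rw [hfmem j y hy, hx]; exact hij
    rcases hk x with h | h | h | h
    · have := insert_pos k x (fs.filter (fun f => k f == 0))
        (fs.filter (fun f => k f == 1) ++ (fs.filter (fun f => k f == 2) ++ fs.filter (fun f => k f == 3)))
        (fun y hy => hlow 0 y hy h)
        (fun y hy => by
          rcases List.mem_append.mp hy with hy | hy
          · exact hfx 0 1 (by norm_num) y hy h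
          rcases List.mem_append.mp hy with hy | hy
          · exact hfx 0 2 (by norm_num) y hy h
          · exact hfx 0 3 (by norm_num) y hy h)
      simp only [bks, List.append_assoc] at this ⊢
      rw [this]
      simp [hbapp, h]
    · have := insert_pos k x (fs.filter (fun f => k f == 0) ++ fs.filter (fun f => k f == 1))
        (fs.filter (fun f => k f == 2) ++ fs.filter (fun f => k f == 3))
        (fun y hy => by
          rcases List.mem_append.mp hy with hy | hy
          · rw [hfmem 0 y hy, h]; norm_num
          · exact hlow 1 y hy h)
        (fun y hy => by
          rcases List.mem_append.mp hy with hy | hy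
          · exact hfx 1 2 (by norm_num) y hy h
          · exact hfx 1 3 (by norm_num) y hy h)
      simp only [bks, List.append_assoc] at this ⊢
      rw [this]
      simp [hbapp, h]
    · have := insert_pos k x
        (fs.filter (fun f => k f == 0) ++ (fs.filter (fun f => k f == 1) ++ fs.filter (fun f => k f == 2)))
        (fs.filter (fun f => k f == 3))
        (fun y hy => by
          rcases List.mem_append.mp hy with hy | hy
          · rw [hfmem 0 y hy, h]; norm_num
          rcases List.mem_append.mp hy with hy | hy
          · rw [hfmem 1 y hy, h]; norm_num
          · exact hlow 2 y hy h)
        (fun y hy => hfx 2 3 (by norm_num) y hy h)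
      simp only [bks, List.append_assoc] at this ⊢
      rw [this]
      simp [hbapp, h]
    · have := insert_pos k x
        (fs.filter (fun f => k f == 0) ++ (fs.filter (fun f => k f == 1) ++
          (fs.filter (fun f => k f == 2) ++ fs.filter (fun f => k f == 3)))) []
        (fun y hy => by
          rcases List.mem_append.mp hy with hy | hy
          · rw [hfmem 0 y hy, h]; norm_num
          rcases List.mem_append.mp hy with hy | hy
          · rw [hfmem 1 y hy, h]; norm_num
          rcases List.mem_append.mp hy with hy | hy
          · rw [hfmem 2 y hy, h]; norm_num
          · exact hlow 3 y hy h)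
        (fun y hy => by simp at hy)
      simp only [bks, List.append_assoc, List.append_nil] at this ⊢
      rw [this]
      simp [hbapp, h]

lemma pvRankB_cases (s : String) : pvRankB s = 0 ∨ pvRankB s = 1 ∨ pvRankB s = 2 ∨ pvRankB s = 3 := by
  by_cases h1 : s = "Critical"
  · subst h1; left; decide
  by_cases h2 : s = "High"
  · subst h2; right; left; decide
  by_cases h3 : s = "Medium"
  · subst h3; right; right; left; decide
  have c1 : ("Critical" == s) = false := by simp [Ne.symm h1]
  have c2 : ("High" == s) = false := by simp [Ne.symm h2]
  have c3 : ("Medium" == s) = false := by simp [Ne.symm h3]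
  right; right; right
  simp [pvRankB, PySem.Dict.getD, PySem.Dict.get?, List.find?, c1, c2, c3]

lemma pvKeyA_eq_rank (f : List (String × String)) : pvKeyA f = pvRankB (pvSev f) := by
  show (((PySem.List.index? ["Critical", "High", "Medium", "Info"]
        (if ["Critical", "High", "Medium", "Info"].contains (pvSev f) then pvSev f else "Info")).getD 0 : Nat) : Int)
      = pvRankB (pvSev f)
  generalize pvSev f = s
  by_cases h1 : s = "Critical"
  · subst h1; decide
  by_cases h2 : s = "High"
  · subst h2; decide
  by_cases h3 : s = "Medium"
  · subst h3; decide
  by_cases h4 : s = "Info"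
  · subst h4; decide
  have c1 : ("Critical" == s) = false := by simp [Ne.symm h1]
  have c2 : ("High" == s) = false := by simp [Ne.symm h2]
  have c3 : ("Medium" == s) = false := by simp [Ne.symm h3]
  have hc : (["Critical", "High", "Medium", "Info"].contains s) = false := by
    simp only [List.contains_cons, List.contains_nil, Bool.or_false, Bool.or_eq_false_iff,
      beq_eq_false_iff_ne, ne_eq]
    exact ⟨h1, h2, h3, h4⟩
  rw [hc]
  simp only [if_false, Bool.false_eq_true]
  rw [show pvRankB s = 3 from by simp [pvRankB, PySem.Dict.getD, PySem.Dict.get?, List.find?, c1, c2, c3]]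
  decide

lemma pvCollect_eq (r : Int) (fs : List (List (String × String))) (acc : List String)
    (h : acc.length < 3) :
    pvCollect r fs acc = (acc ++ (fs.filter (fun f => pvRankB (pvSev f) == r)).map pvTitle).take 3 := by
  induction fs generalizing acc with
  | nil =>
    simp only [pvCollect, List.filter_nil, List.map_nil, List.append_nil]
    exact (List.take_of_length_le (Nat.le_of_lt h)).symm
  | cons f rest ih =>
    show (if pvRankB ((PySem.Dict.mk f).getD "severity" "Info") = r then
        let acc2 := acc ++ [(PySem.Dict.mk f).getD "title" ""]
        if acc2.length = 3 then acc2 else pvCollect r rest acc2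
      else pvCollect r rest acc) = _
    by_cases hr : pvRankB ((PySem.Dict.mk f).getD "severity" "Info") = r
    · rw [if_pos hr]
      have hfil : (f :: rest).filter (fun g => pvRankB (pvSev g) == r)
          = f :: rest.filter (fun g => pvRankB (pvSev g) == r) := by
        simp [pvSev, hr]
      rw [hfil]
      simp only [List.map_cons]
      by_cases hl : (acc ++ [(PySem.Dict.mk f).getD "title" ""]).length = 3
      · rw [if_pos hl]
        rw [show acc ++ pvTitle f :: (rest.filter (fun g => pvRankB (pvSev g) == r)).map pvTitle
              = (acc ++ [pvTitle f]) ++ (rest.filter (fun g => pvRankB (pvSev g) == r)).map pvTitle by simp]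
        rw [List.take_left' (by simpa [pvTitle] using hl)]
        rfl
      · rw [if_neg hl]
        have hlt : (acc ++ [(PySem.Dict.mk f).getD "title" ""]).length < 3 := by
          simp only [List.length_append, List.length_cons, List.length_nil] at hl ⊢
          omega
        rw [ih _ hlt]
        congr 1
        simp [pvTitle]
    · rw [if_neg hr]
      have hfil : (f :: rest).filter (fun g => pvRankB (pvSev g) == r)
          = rest.filter (fun g => pvRankB (pvSev g) == r) := by
        simp [pvSev, hr]
      rw [hfil, ih _ h]

lemma pvStep_take (r : Int) (fs : List (List (String × String))) (P : List String) :
    (if (P.take 3).length = 3 then P.take 3 else pvCollect r fs (P.take 3))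
      = (P ++ (fs.filter (fun f => pvRankB (pvSev f) == r)).map pvTitle).take 3 := by
  by_cases hp : 3 ≤ P.length
  · rw [if_pos (by simp [List.length_take, Nat.min_eq_left hp])]
    rw [List.take_append_of_le_length hp]
  · have hlen : P.length < 3 := Nat.lt_of_not_le hp
    have htp : P.take 3 = P := List.take_of_length_le (Nat.le_of_lt hlen)
    rw [if_neg (by rw [htp]; omega), pvCollect_eq _ _ _ (by rw [htp]; omega), htp]

lemma pvTitles_eq (fs : List (List (String × String))) :
    (PySem.List.pyRange 0 4 1).foldl (fun acc r => if acc.length = 3 then acc else pvCollect r fs acc) []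
      = ((bks (fun f => pvRankB (pvSev f)) fs).map pvTitle).take 3 := by
  rw [show PySem.List.pyRange 0 4 1 = [(0 : Int), 1, 2, 3] from by decide]
  simp only [List.foldl_cons, List.foldl_nil]
  rw [show ([] : List String) = (([] : List String)).take 3 from rfl]
  rw [pvStep_take 0 fs [], List.nil_append]
  rw [pvStep_take 1 fs _, pvStep_take 2 fs _, pvStep_take 3 fs _]
  simp [bks, List.append_assoc]

lemma pvCounts_eq (fs : List (List (String × String))) (c h m i : Int) :
    fs.foldl (fun (s : Int × Int × Int × Int) f =>
      let sev := (PySem.Dict.mk f).getD "severity" "Info"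
      if sev = "Critical" then (s.1 + 1, s.2.1, s.2.2.1, s.2.2.2)
      else if sev = "High" then (s.1, s.2.1 + 1, s.2.2.1, s.2.2.2)
      else if sev = "Medium" then (s.1, s.2.1, s.2.2.1 + 1, s.2.2.2)
      else if sev = "Info" ∨ sev = "Low" then (s.1, s.2.1, s.2.2.1, s.2.2.2 + 1)
      else s) (c, h, m, i)
    = (c + ((fs.map pvSev).count "Critical" : Int), h + ((fs.map pvSev).count "High" : Int),
       m + ((fs.map pvSev).count "Medium" : Int),
       i + ((fs.map pvSev).count "Info" : Int) + ((fs.map pvSev).count "Low" : Int)) := by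
  induction fs generalizing c h m i with
  | nil => simp
  | cons f rest ih =>
    simp only [List.foldl_cons, List.map_cons]
    by_cases h1 : pvSev f = "Critical"
    · rw [show (PySem.Dict.mk f).getD "severity" "Info" = "Critical" from h1, h1]
      simp only [reduceIte, String.reduceEq, ih, List.count_cons, Prod.mk.injEq]
      refine ⟨?_, ?_, ?_, ?_⟩ <;> · push_cast; simp; try omega
    · by_cases h2 : pvSev f = "High"
      · rw [show (PySem.Dict.mk f).getD "severity" "Info" = "High" from h2, h2]
        simp only [reduceIte, String.reduceEq, ih, List.count_cons, Prod.mk.injEq]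
        refine ⟨?_, ?_, ?_, ?_⟩ <;> · push_cast; simp; try omega
      · by_cases h3 : pvSev f = "Medium"
        · rw [show (PySem.Dict.mk f).getD "severity" "Info" = "Medium" from h3, h3]
          simp only [reduceIte, String.reduceEq, ih, List.count_cons, Prod.mk.injEq]
          refine ⟨?_, ?_, ?_, ?_⟩ <;> · push_cast; simp; try omega
        · by_cases h4 : pvSev f = "Info"
          · rw [show (PySem.Dict.mk f).getD "severity" "Info" = "Info" from h4, h4]
            simp only [reduceIte, String.reduceEq, ih, List.count_cons, Prod.mk.injEq]
            refine ⟨?_, ?_, ?_, ?_⟩ <;> · push_cast; simp; try omega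
          · by_cases h5 : pvSev f = "Low"
            · rw [show (PySem.Dict.mk f).getD "severity" "Info" = "Low" from h5, h5]
              simp only [reduceIte, String.reduceEq, ih, List.count_cons, Prod.mk.injEq]
              refine ⟨?_, ?_, ?_, ?_⟩ <;> · push_cast; simp; try omega
            · rw [show (PySem.Dict.mk f).getD "severity" "Info" = pvSev f from rfl]
              rw [if_neg h1, if_neg h2, if_neg h3, if_neg (by tauto)]
              simp only [ih, List.count_cons, Prod.mk.injEq]
              refine ⟨?_, ?_, ?_, ?_⟩ <;>
                · simp [h1, h2, h3, h4, h5]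


lemma pvSorted_eq_bks (fs : List (List (String × String))) :
    PySem.List.sorted fs (fun x => pvKeyA x) false = bks (fun f => pvRankB (pvSev f)) fs := by
  rw [show (fun x => pvKeyA x) = (fun f => pvRankB (pvSev f)) from funext pvKeyA_eq_rank]
  exact sorted_eq_bks _ (fun f => pvRankB_cases (pvSev f)) fs

-- ===== VERDICT (by name: the statement is the Claim_ definition above) =====
theorem build_ai_summary_spec : Claim_equal_build_ai_summary := by
  intro findings _
  unfold Spec_build_ai_summary
  by_cases h : findings = []
  · simp [build_ai_summary, build_ai_summary_alt, h]
  · simp only [build_ai_summary, build_ai_summary_alt, if_neg h]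
    rw [pvCounts_eq, pvTitles_eq]
    simp only [PySem.Dict.getD_counter, zero_add]
    rw [show (PySem.List.slice (PySem.List.sorted findings (fun x => pvKeyA x) false) none (some 3))
          = (PySem.List.sorted findings (fun x => pvKeyA x) false).take 3 from by
        simpa using PySem.List.slice_to (PySem.List.sorted findings (fun x => pvKeyA x) false) (b := 3) (by norm_num)]
    rw [pvSorted_eq_bks, ← List.map_take]
    rfl
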